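-- pv_equiv track=rewrite | github.com/thwu1/trlx | examples/hh/utils.py | from_openchat_to_llama
-- ===== SOURCE A (Python) =====
-- from typing import List, Dict
--
-- def from_openchat_to_llama(str_sample: str) -> str:
--     ls = to_list(str_sample, "GPT4 Correct User:", "GPT4 Correct Assistant:")
--     str = ""
--     for content in ls:
--         for key in content:
--             if key == "human":
--                 str += "[INST] " + content[key] + " "
--             else:
--                 str += "[/INST] " + content[key] + "</s> "
--     return str.strip()
--
-- def strip_ls(ls: List[str]) -> List[str]:
--     for i, content in enumerate(ls):
--         ls[i] = content.strip()
--     return ls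
--
-- def to_list(str: str, human_template: str, assistant_template: str) -> List[Dict]:
--     """detect human and assistant template, split str into list of strings, note that the splited strings are trimmed"""
--     str_ls = str.split(human_template)
--     ls = strip_ls(str_ls)
--     ls_dict = [{"human": content} for content in ls]
--     output_ls = []
--     for content in ls_dict:
--         new_ls = content["human"].split(assistant_template)
--         new_ls = strip_ls(new_ls)
--         for j, new_content in enumerate(new_ls):
--             if new_content != "":
--                 if j == 0:
--                     output_ls.append({"human": new_content})
--                 else:
--                     output_ls.append({"assistant": new_content})
--     return output_ls
-- ===== SOURCE B (Python) =====
-- def from_openchat_to_llama(str_sample: str) -> str: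
--     """Single left-to-right scan over the string: track the role implied by the
--     last seen template marker and emit each stripped, non-empty segment."""
--     USER = "GPT4 Correct User:"
--     ASSISTANT = "GPT4 Correct Assistant:"
--     out = []
--     human = True
--     buf = []
--
--     def flush():
--         seg = "".join(buf).strip()
--         if seg:
--             out.append("[INST] " + seg + " " if human else "[/INST] " + seg + "</s> ")
--         buf.clear()
--
--     i, n = 0, len(str_sample)
--     while i < n:
--         if str_sample.startswith(USER, i):
--             flush()
--             human = True
--             i += len(USER)
--         elif str_sample.startswith(ASSISTANT, i):
--             flush()
--             human = False
--             i += len(ASSISTANT)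
--         else:
--             buf.append(str_sample[i])
--             i += 1
--     flush()
--     return "".join(out).strip()
-- ===== Notes on version B (the rewrite author's own statement) =====
-- stated objective: alternative
-- what changed: Replaces the nested split-by-user-template / split-by-assistant-template passes that build lists of single-key dicts with a single left-to-right scan of the string that tracks the role implied by the last seen template marker and emits each stripped non-empty segment directly.
import Mathlib
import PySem

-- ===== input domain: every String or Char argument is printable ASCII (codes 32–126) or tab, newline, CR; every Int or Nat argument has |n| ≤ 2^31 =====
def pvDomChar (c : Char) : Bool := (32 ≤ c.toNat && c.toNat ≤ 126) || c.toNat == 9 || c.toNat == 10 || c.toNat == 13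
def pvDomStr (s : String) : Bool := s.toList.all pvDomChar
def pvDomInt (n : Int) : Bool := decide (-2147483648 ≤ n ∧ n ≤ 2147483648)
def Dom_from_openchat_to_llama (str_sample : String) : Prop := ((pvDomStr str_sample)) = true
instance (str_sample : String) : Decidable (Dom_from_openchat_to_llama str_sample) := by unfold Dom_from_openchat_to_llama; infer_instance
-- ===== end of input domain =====

-- B replaces A's nested split-into-dict-lists by a single left-to-right scan that tracks
-- the role implied by the last seen template marker (alternative decomposition, not faster).

-- ===== PORT A =====

def pvStripLs (ls : List (List Char)) : List (List Char) :=
  ls.map PySem.Chars.strip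

def pvToList (str hum asst : List Char) : List (PySem.Dict String (List Char)) :=
  let str_ls := PySem.Chars.splitOn str hum
  let ls := pvStripLs str_ls
  let ls_dict := ls.map (fun content => PySem.Dict.mk [("human", content)])
  ls_dict.foldl (fun output_ls content =>
    let new_ls := PySem.Chars.splitOn (PySem.Dict.getD content "human" []) asst
    let new_ls2 := pvStripLs new_ls
    (PySem.List.enumerate new_ls2).foldl (fun acc jc =>
      if jc.2 ≠ [] then
        if jc.1 = 0 then acc ++ [PySem.Dict.mk [("human", jc.2)]]
        else acc ++ [PySem.Dict.mk [("assistant", jc.2)]]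
      else acc) output_ls) []

def from_openchat_to_llama (str_sample : String) : String :=
  let ls := pvToList str_sample.toList "GPT4 Correct User:".toList "GPT4 Correct Assistant:".toList
  let r := ls.foldl (fun s content =>
    content.items.foldl (fun s kv =>
      if kv.1 == "human" then s ++ "[INST] ".toList ++ kv.2 ++ " ".toList
      else s ++ "[/INST] ".toList ++ kv.2 ++ "</s> ".toList) s) []
  String.ofList (PySem.Chars.strip r)

-- ===== PORT B =====

def pvEmit (human : Bool) (buf : List Char) (out : List (List Char)) : List (List Char) :=
  let seg := PySem.Chars.strip buf
  if seg = [] then out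
  else out ++ [if human then "[INST] ".toList ++ seg ++ " ".toList
               else "[/INST] ".toList ++ seg ++ "</s> ".toList]

def pvScan : List Char → Bool → List Char → List (List Char) → List (List Char)
  | [], human, buf, out => pvEmit human buf out
  | c :: rest, human, buf, out =>
    if PySem.Chars.startswith (c :: rest) "GPT4 Correct User:".toList then
      pvScan ((c :: rest).drop "GPT4 Correct User:".toList.length) true [] (pvEmit human buf out)
    else if PySem.Chars.startswith (c :: rest) "GPT4 Correct Assistant:".toList then
      pvScan ((c :: rest).drop "GPT4 Correct Assistant:".toList.length) false [] (pvEmit human buf out)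
    else pvScan rest human (buf ++ [c]) out
  termination_by l => l.length
  decreasing_by all_goals simp

def from_openchat_to_llama_alt (str_sample : String) : String :=
  String.ofList (PySem.Chars.strip (PySem.Chars.join [] (pvScan str_sample.toList true [] [])))

-- ===== PRECONDITION & SPEC =====
def Spec_from_openchat_to_llama (str_sample : String) (out : String) : Prop := out = from_openchat_to_llama_alt str_sample
instance (str_sample : String) (out : String) : Decidable (Spec_from_openchat_to_llama str_sample out) := by unfold Spec_from_openchat_to_llama; infer_instance

-- ===== CLAIM (what is proved, stated in full; the proofs are below) =====
def Claim_equal_from_openchat_to_llama : Prop := ∀ (str_sample : String), Dom_from_openchat_to_llama str_sample → Spec_from_openchat_to_llama str_sample (from_openchat_to_llama str_sample)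

-- ===== LEMMAS AND PROOFS =====

def splitP (s0 : Char) (sp : List Char) : List Char → List (List Char)
  | [] => [[]]
  | c :: rest =>
    if (s0 :: sp).isPrefixOf (c :: rest) then
      [] :: splitP s0 sp ((c :: rest).drop (s0 :: sp).length)
    else (splitP s0 sp rest).modifyHead (c :: ·)
  termination_by l => l.length
  decreasing_by all_goals simp

lemma go_eq (s0 : Char) (sp : List Char) :
    ∀ fuel (l cur acc : _), l.length < fuel →
    PySem.Chars.splitOn.go (s0 :: sp) fuel l cur acc
      = acc.reverse ++ (splitP s0 sp l).modifyHead (cur.reverse ++ ·) := by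
  intro fuel
  induction fuel with
  | zero => intro l cur acc h; omega
  | succ n ih =>
    intro l cur acc h
    match l with
    | [] => simp [PySem.Chars.splitOn.go, splitP]
    | c :: rest =>
      rw [PySem.Chars.splitOn.go]
      by_cases hp : (s0 :: sp).isPrefixOf (c :: rest)
      · rw [if_pos hp, ih _ _ _ (by simp at h ⊢; omega)]
        rw [splitP, if_pos hp]
        cases splitP s0 sp (List.drop (s0 :: sp).length (c :: rest)) <;> simp
      · rw [if_neg hp, ih _ _ _ (by simp at h ⊢; omega)]
        rw [splitP, if_neg hp]
        rw [List.modifyHead_modifyHead]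
        simp [Function.comp_def]

lemma splitOn_eq (s0 : Char) (sp l : List Char) :
    PySem.Chars.splitOn l (s0 :: sp) = splitP s0 sp l := by
  unfold PySem.Chars.splitOn
  rw [go_eq s0 sp (l.length + 1) l [] [] (by omega)]
  cases splitP s0 sp l <;> simp

lemma splitP_ne_nil (s0 : Char) (sp : List Char) : ∀ l, splitP s0 sp l ≠ [] := by
  intro l
  fun_induction splitP s0 sp l with
  | case1 => simp
  | case2 => simp
  | case3 c rest h ih => cases h' : splitP s0 sp rest <;> simp_all

lemma splitP_head_prefix (s0 : Char) (sp : List Char) :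
    ∀ l, ∃ y ys, splitP s0 sp l = y :: ys ∧ y <+: l := by
  intro l
  fun_induction splitP s0 sp l with
  | case1 => exact ⟨[], [], rfl, by simp⟩
  | case2 c rest h => exact ⟨[], _, rfl, by simp⟩
  | case3 c rest h ih =>
    obtain ⟨y, ys, hy, hpre⟩ := ih
    exact ⟨c :: y, ys, by rw [hy]; rfl, by simpa using hpre⟩

lemma prefix_append_cases {α} (u a t : List α) (h : u <+: a ++ t) : u <+: a ∨ a <+: u := by
  rcases Nat.lt_or_ge a.length u.length with hlt | hle
  · exact Or.inr (List.prefix_of_prefix_length_le (a.prefix_append t) h (le_of_lt hlt))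
  · exact Or.inl (List.prefix_of_prefix_length_le h (a.prefix_append t) hle)

lemma splitP_skip (s0 : Char) (sp : List Char) :
    ∀ p t, (∀ k, k < p.length → ¬ (s0 :: sp) <+: (p.drop k ++ t)) →
    splitP s0 sp (p ++ t) = (splitP s0 sp t).modifyHead (p ++ ·) := by
  intro p
  induction p with
  | nil => intro t _; cases h : splitP s0 sp t <;> simp [h]
  | cons c p' ih =>
    intro t h
    have h0 : ¬ (s0 :: sp) <+: (c :: (p' ++ t)) := by
      have := h 0 (by simp)
      simpa using this
    have : splitP s0 sp (c :: (p' ++ t)) = (splitP s0 sp (p' ++ t)).modifyHead (c :: ·) := by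
      rw [splitP, if_neg (by simpa [List.isPrefixOf_iff_prefix] using h0)]
    rw [List.cons_append, this, ih t (fun k hk => by simpa using h (k+1) (by simp; omega))]
    rw [List.modifyHead_modifyHead]
    congr 1

def modLast (g : List Char → List Char) : List (List Char) → List (List Char)
  | [] => []
  | [a] => [g a]
  | a :: b :: l => a :: modLast g (b :: l)

lemma modLast_cons_of_ne_nil (g : List Char → List Char) (a : List Char)
    (l : List (List Char)) (h : l ≠ []) : modLast g (a :: l) = a :: modLast g l := by
  cases l with
  | nil => exact absurd rfl h
  | cons b t => rfl

lemma modifyHead_modLast_comm (f g : List Char → List Char)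
    (hfg : ∀ a, f (g a) = g (f a)) (l : List (List Char)) :
    List.modifyHead f (modLast g l) = modLast g (List.modifyHead f l) := by
  cases l with
  | nil => rfl
  | cons a t =>
    cases t with
    | nil => simp [modLast, hfg]
    | cons b t' => simp [modLast]

-- all-whitespace list, separator starting with a non-whitespace char: no occurrence
lemma splitP_all_ws (s0 : Char) (sp : List Char) (h0 : PySem.Chars.isspace s0 = false) :
    ∀ w, (∀ c ∈ w, PySem.Chars.isspace c = true) → splitP s0 sp w = [w] := by
  intro w
  induction w with
  | nil => intro _; rw [splitP]
  | cons c w' ih =>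
    intro hw
    have hnp : ¬ (s0 :: sp).isPrefixOf (c :: w') = true := by
      simp [List.isPrefixOf_iff_prefix, List.cons_prefix_cons]
      intro he
      rw [he] at h0
      simp [hw c (by simp)] at h0
    rw [splitP, if_neg hnp, ih (fun c hc => hw c (by simp [hc]))]
    rfl

lemma splitP_ws_suffix (s0 : Char) (sp : List Char) (w : List Char)
    (hw : ∀ c ∈ w, PySem.Chars.isspace c = true)
    (h0 : PySem.Chars.isspace s0 = false)
    (hlast : ∀ x, (s0 :: sp).getLast? = some x → PySem.Chars.isspace x = false) :
    ∀ y, splitP s0 sp (y ++ w) = modLast (· ++ w) (splitP s0 sp y) := by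
  suffices H : ∀ n (y : List Char), y.length ≤ n →
      splitP s0 sp (y ++ w) = modLast (· ++ w) (splitP s0 sp y) by
    intro y; exact H y.length y le_rfl
  intro n
  induction n with
  | zero =>
    intro y hy
    have : y = [] := List.eq_nil_of_length_eq_zero (by omega)
    subst this
    simp only [List.nil_append]
    rw [splitP_all_ws s0 sp h0 w hw, splitP]
    simp [modLast]
  | succ n ih =>
    intro y hy
    cases y with
    | nil =>
      simp only [List.nil_append]
      rw [splitP_all_ws s0 sp h0 w hw, splitP]
      simp [modLast]
    | cons c rest =>
      by_cases hp : (s0 :: sp) <+: (c :: rest)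
      · have hL : (s0 :: sp).length ≤ (c :: rest).length := hp.length_le
        have hsplit : splitP s0 sp (c :: rest) =
            [] :: splitP s0 sp ((c :: rest).drop (s0 :: sp).length) := by
          rw [splitP, if_pos (by simpa [List.isPrefixOf_iff_prefix] using hp)]
        have hsplit2 : splitP s0 sp ((c :: rest) ++ w) =
            [] :: splitP s0 sp ((c :: rest).drop (s0 :: sp).length ++ w) := by
          rw [List.cons_append, splitP,
            if_pos (by simpa [List.isPrefixOf_iff_prefix] using hp.trans ((c :: rest).prefix_append w)),
            ← List.cons_append, List.drop_append_of_le_length hL]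
        rw [hsplit2, hsplit, ih _ (by simp at hy ⊢; omega),
          modLast_cons_of_ne_nil _ _ _ (splitP_ne_nil s0 sp _)]
      · have hp2 : ¬ (s0 :: sp) <+: ((c :: rest) ++ w) := by
          intro hcon
          rcases prefix_append_cases _ _ _ hcon with h | h
          · exact hp h
          · obtain ⟨r, hr⟩ := h
            have hrne : r ≠ [] := by
              rintro rfl
              exact hp (by rw [← hr]; simp [List.append_nil])
            have hrw : r <+: w := by
              have : (c :: rest) ++ r <+: (c :: rest) ++ w := hr ▸ hcon
              exact (List.prefix_append_right_inj (c :: rest)).mp this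
            obtain ⟨r₀, x, rfl⟩ : ∃ r₀ x, r = r₀ ++ [x] := by
              rcases List.eq_nil_or_concat r with h | ⟨r₀, x, h⟩
              · exact absurd h hrne
              · exact ⟨r₀, x, by simpa [List.concat_eq_append] using h⟩
            have hx : (s0 :: sp).getLast? = some x := by
              rw [← hr, ← List.append_assoc]
              exact List.getLast?_concat
            have h1 : PySem.Chars.isspace x = false := hlast x hx
            have h2 : PySem.Chars.isspace x = true :=
              hw _ (hrw.subset (by simp))
            rw [h1] at h2; exact absurd h2 (by simp)
        have e1 : splitP s0 sp ((c :: rest) ++ w) =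
            (splitP s0 sp (rest ++ w)).modifyHead (c :: ·) := by
          rw [List.cons_append, splitP, if_neg (by simpa [List.isPrefixOf_iff_prefix] using hp2)]
        have e2 : splitP s0 sp (c :: rest) =
            (splitP s0 sp rest).modifyHead (c :: ·) := by
          rw [splitP, if_neg (by simpa [List.isPrefixOf_iff_prefix] using hp)]
        rw [e1, e2, ih rest (by simp at hy; omega),
          modifyHead_modLast_comm (c :: ·) (· ++ w) (fun a => rfl)]

lemma strip_ws_prefix (v h : List Char) (hv : ∀ c ∈ v, PySem.Chars.isspace c = true) :
    PySem.Chars.strip (v ++ h) = PySem.Chars.strip h := by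
  unfold PySem.Chars.strip PySem.Chars.lstrip
  rw [List.dropWhile_append]
  have : List.dropWhile PySem.Chars.isspace v = [] := List.dropWhile_eq_nil_iff.mpr hv
  simp [this]

lemma rstrip_ws_suffix (a w : List Char) (hw : ∀ c ∈ w, PySem.Chars.isspace c = true) :
    PySem.Chars.rstrip (a ++ w) = PySem.Chars.rstrip a := by
  unfold PySem.Chars.rstrip
  rw [List.reverse_append, List.dropWhile_append]
  have : List.dropWhile PySem.Chars.isspace w.reverse = [] :=
    List.dropWhile_eq_nil_iff.mpr (fun c hc => hw c (by simpa using hc))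
  simp [this]

lemma strip_ws_suffix (a w : List Char) (hw : ∀ c ∈ w, PySem.Chars.isspace c = true) :
    PySem.Chars.strip (a ++ w) = PySem.Chars.strip a := by
  unfold PySem.Chars.strip
  unfold PySem.Chars.lstrip
  rw [List.dropWhile_append]
  by_cases h : List.dropWhile PySem.Chars.isspace a = []
  · simp [h]
    rw [(List.dropWhile_eq_nil_iff (l := w) (p := PySem.Chars.isspace)).mpr
      (fun c hc => hw c hc)]
  · simp [h]
    exact rstrip_ws_suffix _ w hw

lemma map_strip_modifyHead (f : List Char → List Char)
    (hf : ∀ h, PySem.Chars.strip (f h) = PySem.Chars.strip h) (L : List (List Char)) :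
    (L.modifyHead f).map PySem.Chars.strip = L.map PySem.Chars.strip := by
  cases L with
  | nil => rfl
  | cons h t => simp [hf]

lemma map_strip_modLast (g : List Char → List Char)
    (hg : ∀ h, PySem.Chars.strip (g h) = PySem.Chars.strip h) (L : List (List Char)) :
    (modLast g L).map PySem.Chars.strip = L.map PySem.Chars.strip := by
  induction L with
  | nil => rfl
  | cons a t ih =>
    cases t with
    | nil => simp [modLast, hg]
    | cons b t' => simpa [modLast] using ih

lemma map_strip_splitP_strip (s0 : Char) (sp : List Char)
    (h0 : PySem.Chars.isspace s0 = false)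
    (hlast : ∀ x, (s0 :: sp).getLast? = some x → PySem.Chars.isspace x = false)
    (x : List Char) :
    (splitP s0 sp (PySem.Chars.strip x)).map PySem.Chars.strip
      = (splitP s0 sp x).map PySem.Chars.strip := by
  set v := List.takeWhile PySem.Chars.isspace x with hv
  set l₁ := List.dropWhile PySem.Chars.isspace x with hl₁
  have hx : x = v ++ l₁ := (List.takeWhile_append_dropWhile).symm
  have hvws : ∀ c ∈ v, PySem.Chars.isspace c = true := fun c hc => List.mem_takeWhile_imp hc
  have hskip : splitP s0 sp x = (splitP s0 sp l₁).modifyHead (v ++ ·) := by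
    conv_lhs => rw [hx]
    apply splitP_skip
    intro k hk hcon
    have hne : v.drop k ≠ [] := by
      intro hnil
      rw [← List.length_eq_zero_iff] at hnil
      simp at hnil; omega
    cases hd : v.drop k with
    | nil => exact hne hd
    | cons d ds =>
      rw [hd] at hcon
      rw [List.cons_append, List.cons_prefix_cons] at hcon
      have hdv : d ∈ v := by
        have : d ∈ v.drop k := by rw [hd]; simp
        exact List.mem_of_mem_drop this
      rw [hcon.1] at h0
      rw [hvws d hdv] at h0
      exact absurd h0 (by simp)
  set a := PySem.Chars.rstrip l₁ with ha
  set wsuf := (List.takeWhile PySem.Chars.isspace l₁.reverse).reverse with hwsuf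
  have hl₁eq : l₁ = a ++ wsuf := by
    rw [ha, hwsuf]
    unfold PySem.Chars.rstrip
    rw [← List.reverse_append, List.takeWhile_append_dropWhile, List.reverse_reverse]
  have hwsufws : ∀ c ∈ wsuf, PySem.Chars.isspace c = true := by
    intro c hc
    rw [hwsuf] at hc
    exact List.mem_takeWhile_imp (List.mem_reverse.mp hc)
  have hstripx : PySem.Chars.strip x = a := by
    rw [ha]; unfold PySem.Chars.strip PySem.Chars.lstrip; rw [← hl₁]
  have hsuffix : splitP s0 sp l₁ = modLast (· ++ wsuf) (splitP s0 sp a) := by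
    conv_lhs => rw [hl₁eq]
    exact splitP_ws_suffix s0 sp wsuf hwsufws h0 hlast a
  rw [hstripx, hskip, map_strip_modifyHead _ (fun h => strip_ws_prefix v h hvws),
    hsuffix, map_strip_modLast _ (fun h => strip_ws_suffix h wsuf hwsufws)]

def pvU : List Char := "GPT4 Correct User:".toList
def pvA : List Char := "GPT4 Correct Assistant:".toList

def splitU (l : List Char) : List (List Char) := splitP 'G' "PT4 Correct User:".toList l
def splitA (l : List Char) : List (List Char) := splitP 'G' "PT4 Correct Assistant:".toList l

lemma pvU_cons : pvU = 'G' :: "PT4 Correct User:".toList := by decide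
lemma pvA_cons : pvA = 'G' :: "PT4 Correct Assistant:".toList := by decide

lemma splitU_eq (l : List Char) : PySem.Chars.splitOn l pvU = splitU l := by
  rw [pvU_cons, splitOn_eq]; rfl
lemma splitA_eq (l : List Char) : PySem.Chars.splitOn l pvA = splitA l := by
  rw [pvA_cons, splitOn_eq]; rfl

lemma splitU_pos {l : List Char} (h : pvU <+: l) (hn : l ≠ []) :
    splitU l = [] :: splitU (l.drop pvU.length) := by
  cases l with
  | nil => exact absurd rfl hn
  | cons c rest =>
    unfold splitU
    rw [splitP, if_pos (by rw [List.isPrefixOf_iff_prefix]; exact pvU_cons ▸ h)]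
    rfl
lemma splitU_neg {c : Char} {rest : List Char} (h : ¬ pvU <+: c :: rest) :
    splitU (c :: rest) = (splitU rest).modifyHead (c :: ·) := by
  unfold splitU
  rw [splitP, if_neg (by rw [List.isPrefixOf_iff_prefix]; intro hc; exact h (pvU_cons ▸ hc))]
lemma splitA_pos {l : List Char} (h : pvA <+: l) (hn : l ≠ []) :
    splitA l = [] :: splitA (l.drop pvA.length) := by
  cases l with
  | nil => exact absurd rfl hn
  | cons c rest =>
    unfold splitA
    rw [splitP, if_pos (by rw [List.isPrefixOf_iff_prefix]; exact pvA_cons ▸ h)]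
    rfl
lemma splitA_neg {c : Char} {rest : List Char} (h : ¬ pvA <+: c :: rest) :
    splitA (c :: rest) = (splitA rest).modifyHead (c :: ·) := by
  unfold splitA
  rw [splitP, if_neg (by rw [List.isPrefixOf_iff_prefix]; intro hc; exact h (pvA_cons ▸ hc))]

def segOut (human : Bool) (q : List Char) : List Char :=
  if human then "[INST] ".toList ++ q ++ " ".toList else "[/INST] ".toList ++ q ++ "</s> ".toList

def segs1 (human : Bool) (p : List Char) : List (List Char) :=
  if PySem.Chars.strip p = [] then [] else [segOut human (PySem.Chars.strip p)]

def pcs : Bool → List (List Char) → List (List Char)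
  | _, [] => []
  | human, p :: ps => segs1 human p ++ pcs false ps

def target (human : Bool) (buf : List Char) (l : List Char) : List (List Char) :=
  match splitU l with
  | [] => []
  | y :: ys => pcs human ((splitA y).modifyHead (buf ++ ·)) ++
      ys.flatMap (fun ch => pcs true (splitA ch))

lemma emit_eq (human : Bool) (buf : List Char) (out : List (List Char)) :
    pvEmit human buf out = out ++ segs1 human buf := by
  unfold pvEmit segs1 segOut
  split_ifs <;> simp_all

lemma target_eq {l : List Char} {y : List Char} {ys : List (List Char)}
    (h : splitU l = y :: ys) (human : Bool) (buf : List Char) :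
    target human buf l = pcs human ((splitA y).modifyHead (buf ++ ·)) ++
      ys.flatMap (fun ch => pcs true (splitA ch)) := by
  unfold target; rw [h]

lemma modifyHead_nil_append' (L : List (List Char)) : L.modifyHead (fun p => [] ++ p) = L := by
  cases L <;> simp

lemma target_nil_buf (t : List Char) :
    target true [] t = (splitU t).flatMap (fun ch => pcs true (splitA ch)) := by
  obtain ⟨y, ys, hy, -⟩ := splitP_head_prefix 'G' "PT4 Correct User:".toList t
  have hy' : splitU t = y :: ys := hy
  rw [target_eq hy', hy']
  simp only [List.flatMap_cons]
  congr 1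
  rw [modifyHead_nil_append' (splitA y)]

-- marker overlap facts, checked by computation
lemma overlap_UA : ∀ k, k < pvA.length → ¬ (pvU <+: pvA.drop k) ∧ ¬ (pvA.drop k <+: pvU) := by decide

lemma target_cons {t y : List Char} {ys : List (List Char)} (h : splitU t = y :: ys) (role : Bool) :
    target role [] t = pcs role (splitA y) ++ ys.flatMap (fun ch => pcs true (splitA ch)) := by
  rw [target_eq h]
  congr 1
  rw [modifyHead_nil_append' (splitA y)]

theorem pvScan_target (l : List Char) (human : Bool) (buf : List Char)
    (out : List (List Char)) : pvScan l human buf out = out ++ target human buf l := by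
  fun_induction pvScan l human buf out with
  | case1 human buf out =>
    rw [emit_eq]
    have h0 : splitU ([] : List Char) = [[]] := by unfold splitU; rw [splitP]
    rw [target_eq h0]
    have hA : splitA ([] : List Char) = [[]] := by unfold splitA; rw [splitP]
    rw [hA]
    simp [pcs, segs1]
  | case2 c rest human buf out hU ih =>
    have hU' : pvU <+: c :: rest := by
      rw [PySem.Chars.startswith_iff] at hU; exact hU
    rw [ih, emit_eq]
    have hsp : splitU (c :: rest) = [] :: splitU (List.drop pvU.length (c :: rest)) :=
      splitU_pos hU' (by simp)
    rw [target_eq hsp, target_nil_buf]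
    have hA : splitA ([] : List Char) = [[]] := by unfold splitA; rw [splitP]
    rw [hA]
    simp [pcs, segs1, List.append_assoc, pvU]
  | case3 c rest human buf out hU hA ih =>
    have hA' : pvA <+: c :: rest := by
      rw [PySem.Chars.startswith_iff] at hA; exact hA
    obtain ⟨t, ht⟩ := hA'
    have hdrop : List.drop "GPT4 Correct Assistant:".toList.length (c :: rest) = t := by
      rw [← ht]
      exact List.drop_left
    have hskip : splitU (c :: rest) = (splitU t).modifyHead (fun x => pvA ++ x) := by
      rw [← ht]
      unfold splitU
      apply splitP_skip
      intro k hk hcon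
      rw [← pvU_cons] at hcon
      rcases prefix_append_cases pvU (pvA.drop k) t hcon with h | h
      · exact (overlap_UA k hk).1 h
      · exact (overlap_UA k hk).2 h
    obtain ⟨y, ys, hy, -⟩ := splitP_head_prefix 'G' "PT4 Correct User:".toList t
    have hy' : splitU t = y :: ys := hy
    have hsp : splitU (c :: rest) = (pvA ++ y) :: ys := by
      rw [hskip, hy']; rfl
    rw [ih, emit_eq, hdrop, target_cons hy', target_eq hsp]
    have hAy : splitA (pvA ++ y) = [] :: splitA y :=
      splitA_pos (pvA.prefix_append y) (by simp [pvA])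
    rw [hAy]
    simp [pcs, segs1, List.append_assoc]
  | case4 c rest human buf out hU hA ih =>
    have hUn : ¬ pvU <+: c :: rest := by
      rw [PySem.Chars.startswith_iff] at hU; exact hU
    have hAn : ¬ pvA <+: c :: rest := by
      rw [PySem.Chars.startswith_iff] at hA; exact hA
    rw [ih]
    obtain ⟨y, ys, hy, hpre⟩ := splitP_head_prefix 'G' "PT4 Correct User:".toList rest
    have hy' : splitU rest = y :: ys := hy
    have hsp : splitU (c :: rest) = (c :: y) :: ys := by
      rw [splitU_neg hUn, hy']; rfl
    rw [target_eq hsp, target_eq hy']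
    have hAcy : ¬ pvA <+: c :: y := by
      intro hcon
      exact hAn (hcon.trans (List.cons_prefix_cons.mpr ⟨rfl, hpre⟩))
    rw [splitA_neg hAcy, List.modifyHead_modifyHead]
    have hfun : ((fun x => buf ++ x) ∘ (c :: ·)) = (fun p => (buf ++ [c]) ++ p) := by
      funext p; simp
    rw [hfun]

def gseg (jc : Int × List Char) : List (PySem.Dict String (List Char)) :=
  if jc.2 ≠ [] then
    (if jc.1 = 0 then [PySem.Dict.mk [("human", jc.2)]] else [PySem.Dict.mk [("assistant", jc.2)]])
  else []

def renderD (d : PySem.Dict String (List Char)) : List Char :=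
  d.items.flatMap (fun kv =>
    if kv.1 == "human" then "[INST] ".toList ++ kv.2 ++ " ".toList
    else "[/INST] ".toList ++ kv.2 ++ "</s> ".toList)

lemma mapstripA (x : List Char) :
    (splitA (PySem.Chars.strip x)).map PySem.Chars.strip = (splitA x).map PySem.Chars.strip := by
  apply map_strip_splitP_strip
  · decide
  · intro x hx
    have h2 : ('G' :: "PT4 Correct Assistant:".toList).getLast? = some ':' := by decide
    rw [h2] at hx
    injection hx with hx
    rw [← hx]
    decide

lemma pvToList_char (s : List Char) :
    pvToList s pvU pvA
      = (splitU s).flatMap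
          (fun ch => (PySem.List.enumerate (((splitA ch).map PySem.Chars.strip)) 0).flatMap gseg) := by
  unfold pvToList pvStripLs
  simp only [splitU_eq]
  rw [show (fun output_ls (content : PySem.Dict String (List Char)) =>
        (PySem.List.enumerate ((PySem.Chars.splitOn (PySem.Dict.getD content "human" []) pvA).map PySem.Chars.strip)).foldl
          (fun acc jc =>
            if jc.2 ≠ [] then
              if jc.1 = 0 then acc ++ [PySem.Dict.mk [("human", jc.2)]]
              else acc ++ [PySem.Dict.mk [("assistant", jc.2)]]
            else acc) output_ls)
      = (fun output_ls content => output_ls ++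
          (PySem.List.enumerate ((PySem.Chars.splitOn (PySem.Dict.getD content "human" []) pvA).map PySem.Chars.strip)).flatMap gseg) from ?_ ]
  · rw [PySem.List.foldl_append_eq_flatMap]
    rw [List.nil_append, List.flatMap_map, List.flatMap_map]
    apply List.flatMap_congr
    intro ch _
    have hg : (PySem.Dict.mk [("human", PySem.Chars.strip ch)]).getD "human" ([] : List Char)
        = PySem.Chars.strip ch := by
      simp [PySem.Dict.getD, PySem.Dict.get?]
    show List.flatMap gseg (PySem.List.enumerate ((PySem.Chars.splitOn
        ((PySem.Dict.mk [("human", PySem.Chars.strip ch)]).getD "human" []) pvA).map PySem.Chars.strip)) = _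
    rw [hg, splitA_eq, mapstripA]
  · funext output_ls content
    rw [show (fun (acc : List (PySem.Dict String (List Char))) (jc : Int × List Char) =>
          if jc.2 ≠ [] then
            if jc.1 = 0 then acc ++ [PySem.Dict.mk [("human", jc.2)]]
            else acc ++ [PySem.Dict.mk [("assistant", jc.2)]]
          else acc) = (fun acc jc => acc ++ gseg jc) from ?_ ]
    · rw [PySem.List.foldl_append_eq_flatMap]
    · funext acc jc
      unfold gseg
      split_ifs <;> simp

lemma flatten_flatMap {α β : Type} (l : List α) (f : α → List (List β)) :
    (l.flatMap f).flatten = l.flatMap (fun x => (f x).flatten) := by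
  induction l with
  | nil => rfl
  | cons a t ih => simp_all

lemma join_nil_flatten (parts : List (List Char)) : PySem.Chars.join [] parts = parts.flatten := by
  show [].intercalate parts = parts.flatten
  induction parts with
  | nil => rfl
  | cons a t ih =>
    cases t with
    | nil => simp [List.intercalate]
    | cons b t' =>
      simp [List.intercalate, List.intersperse] at ih ⊢
      simpa using ih

lemma E_assist : ∀ (ps : List (List Char)) (n : Int), 1 ≤ n →
    ((PySem.List.enumerate (ps.map PySem.Chars.strip) n).flatMap gseg).flatMap renderD
      = (pcs false ps).flatten := by
  intro ps
  induction ps with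
  | nil => intro n _; rfl
  | cons p t ih =>
    intro n hn
    show ((( n, PySem.Chars.strip p) :: PySem.List.enumerate (t.map PySem.Chars.strip) (n+1)).flatMap gseg).flatMap renderD = _
    rw [List.flatMap_cons, List.flatMap_append, ih (n+1) (by omega)]
    show (gseg (n, PySem.Chars.strip p)).flatMap renderD ++ _ = (segs1 false p ++ pcs false t).flatten
    rw [List.flatten_append]
    congr 1
    unfold gseg segs1
    by_cases hq : PySem.Chars.strip p = []
    · simp [hq]
    · have hn0 : ¬ (n = 0) := by omega
      simp only [hq, hn0, if_false, ite_not]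
      simp [renderD, segOut]

lemma E_human (ps : List (List Char)) :
    ((PySem.List.enumerate (ps.map PySem.Chars.strip) 0).flatMap gseg).flatMap renderD
      = (pcs true ps).flatten := by
  cases ps with
  | nil => rfl
  | cons p t =>
    show ((((0 : Int), PySem.Chars.strip p) :: PySem.List.enumerate (t.map PySem.Chars.strip) 1).flatMap gseg).flatMap renderD = _
    rw [List.flatMap_cons, List.flatMap_append, E_assist t 1 (by omega)]
    show (gseg (0, PySem.Chars.strip p)).flatMap renderD ++ _ = (segs1 true p ++ pcs false t).flatten
    rw [List.flatten_append]
    congr 1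
    unfold gseg segs1
    by_cases hq : PySem.Chars.strip p = []
    · simp [hq]
    · simp only [hq, if_true, ite_not]
      simp [renderD, segOut]

theorem main_eq (s : String) : from_openchat_to_llama s = from_openchat_to_llama_alt s := by
  simp only [from_openchat_to_llama, from_openchat_to_llama_alt]
  rw [show (fun (sacc : List Char) (content : PySem.Dict String (List Char)) =>
        content.items.foldl (fun s kv =>
          if kv.1 == "human" then s ++ "[INST] ".toList ++ kv.2 ++ " ".toList
          else s ++ "[/INST] ".toList ++ kv.2 ++ "</s> ".toList) sacc)
      = (fun sacc content => sacc ++ renderD content) from ?_ ]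
  · rw [PySem.List.foldl_append_eq_flatMap, List.nil_append]
    rw [show "GPT4 Correct User:".toList = pvU from rfl,
        show "GPT4 Correct Assistant:".toList = pvA from rfl]
    rw [pvToList_char, pvScan_target, List.nil_append, target_nil_buf, join_nil_flatten]
    congr 2
    rw [List.flatMap_assoc, flatten_flatMap]
    apply List.flatMap_congr
    intro ch _
    exact E_human (splitA ch)
  · funext sacc content
    rw [show (fun (s : List Char) (kv : String × List Char) =>
          if kv.1 == "human" then s ++ "[INST] ".toList ++ kv.2 ++ " ".toList
          else s ++ "[/INST] ".toList ++ kv.2 ++ "</s> ".toList)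
        = (fun s kv => s ++ (if kv.1 == "human" then "[INST] ".toList ++ kv.2 ++ " ".toList
            else "[/INST] ".toList ++ kv.2 ++ "</s> ".toList)) from ?_ ]
    · rw [PySem.List.foldl_append_eq_flatMap]
      rfl
    · funext sl kv
      split_ifs <;> simp

-- ===== VERDICT (by name: the statement is the Claim_ definition above) =====
theorem from_openchat_to_llama_spec : Claim_equal_from_openchat_to_llama := by
  intro s _
  unfold Spec_from_openchat_to_llama
  exact main_eq s
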